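-- pv_equiv track=rewrite | github.com/shrenik007/big-data-spark | spark coding/Workspace/1_Spark_Core/7_Advance_Features/p28_click_counts.py | has_novel_click
-- ===== SOURCE A (Python) =====
-- def has_novel_click(my_pair):
--     # 1. We generate the output value to return
--     res = False
--
--     # 2. We collect the elements
--     user_topics = my_pair[1][0]
--     user_clicks = my_pair[1][1]
--
--     # 3. We traverse the clicks so as to see if there is any not being in user_topics
--     size = len(user_clicks)
--     index = 0
--     while (index < size) and (res == False):
--         # 3.1. If the click is new we finish
--         if user_clicks[index] not in user_topics:
--             res = True
--         # 3.2. Otherwise, we continue with the next one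
--         else:
--             index = index + 1
--
--     # 4. We output res
--     return res
-- ===== SOURCE B (Python) =====
-- def has_novel_click(my_pair):
--     # Bulk set difference instead of an indexed scan: any click outside the topics?
--     return bool(set(my_pair[1][1]).difference(my_pair[1][0]))
-- ===== Notes on version B (the rewrite author's own statement) =====
-- stated objective: simpler
-- what changed: Replaced the indexed while-loop with a flag and manual short-circuit by one bulk set-difference whose emptiness is tested; the loop, index and res flag are gone.
import Mathlib
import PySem

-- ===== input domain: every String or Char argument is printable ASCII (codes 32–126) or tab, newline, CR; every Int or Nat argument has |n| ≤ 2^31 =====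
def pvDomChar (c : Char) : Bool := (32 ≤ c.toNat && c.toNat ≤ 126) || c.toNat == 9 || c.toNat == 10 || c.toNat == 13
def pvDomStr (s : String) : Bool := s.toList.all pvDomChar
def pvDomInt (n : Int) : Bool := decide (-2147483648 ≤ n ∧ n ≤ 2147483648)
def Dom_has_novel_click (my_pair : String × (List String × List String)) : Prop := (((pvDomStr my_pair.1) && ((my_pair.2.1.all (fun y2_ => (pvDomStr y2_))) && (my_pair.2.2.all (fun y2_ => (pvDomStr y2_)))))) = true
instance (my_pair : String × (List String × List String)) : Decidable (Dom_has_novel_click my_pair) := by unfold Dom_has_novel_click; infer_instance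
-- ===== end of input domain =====

-- B replaces A's indexed while-loop (manual short-circuit via a res flag) by one bulk
-- set-difference set(clicks) - topics tested for emptiness; return values proved equal.
-- ===== PORT A =====
-- A's while loop: index and res flag, short-circuit on the first novel click.
def pvLoopA (user_topics user_clicks : List String) (size index : Nat) (res : Bool) : Bool :=
  if index < size ∧ res = false then
    if !(decide (PySem.List.pyGetD user_clicks (index : Int) "" ∈ user_topics)) then
      pvLoopA user_topics user_clicks size index true
    else
      pvLoopA user_topics user_clicks size (index + 1) res
  else res
termination_by (size - index) + (if res then 0 else 1)
decreasing_by
  all_goals simp_all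
  all_goals omega

def has_novel_click (my_pair : String × (List String × List String)) : Bool :=
  let user_topics := my_pair.2.1
  let user_clicks := my_pair.2.2
  pvLoopA user_topics user_clicks user_clicks.length 0 false

-- ===== PORT B =====
-- B: emptiness of the bulk set difference set(clicks) - topics.
def has_novel_click_alt (my_pair : String × (List String × List String)) : Bool :=
  !(PySem.Set.diff (PySem.Set.ofList my_pair.2.2) my_pair.2.1).isEmpty

-- ===== PRECONDITION & SPEC =====
def Spec_has_novel_click (my_pair : String × (List String × List String)) (out : Bool) : Prop := out = has_novel_click_alt my_pair
instance (my_pair : String × (List String × List String)) (out : Bool) : Decidable (Spec_has_novel_click my_pair out) := by unfold Spec_has_novel_click; infer_instance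

-- ===== CLAIM (what is proved, stated in full; the proofs are below) =====
def Claim_equal_has_novel_click : Prop := ∀ (my_pair : String × (List String × List String)), Dom_has_novel_click my_pair → Spec_has_novel_click my_pair (has_novel_click my_pair)

-- ===== LEMMAS AND PROOFS =====
theorem loopA_drop (topics clicks : List String) (index : Nat) (h : index ≤ clicks.length) :
    pvLoopA topics clicks clicks.length index false =
      (clicks.drop index).any (fun c => !(decide (c ∈ topics))) := by
  by_cases hlt : index < clicks.length
  · have hget : PySem.List.pyGetD clicks (index : Int) "" = clicks[index] := by
      simp [pysem, List.getElem?_eq_getElem hlt]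
    have hdrop : clicks.drop index = clicks[index] :: clicks.drop (index + 1) :=
      List.drop_eq_getElem_cons hlt
    have ih := loopA_drop topics clicks (index + 1) hlt
    rw [pvLoopA]
    by_cases hmem : clicks[index] ∈ topics
    · rw [if_pos ⟨hlt, rfl⟩, hget, hdrop]
      rw [List.any_cons]
      simp [hmem, ih]
    · rw [if_pos ⟨hlt, rfl⟩, hget, hdrop, pvLoopA]
      rw [List.any_cons]
      simp [hlt, hmem]
  · have hix : index = clicks.length := by omega
    rw [pvLoopA]
    simp [hix]
termination_by clicks.length - index

theorem loopA_eq_any (topics clicks : List String) :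
    pvLoopA topics clicks clicks.length 0 false =
      clicks.any (fun c => !(decide (c ∈ topics))) := by
  simpa using loopA_drop topics clicks 0 (Nat.zero_le _)

theorem alt_eq_any (p : String × (List String × List String)) :
    has_novel_click_alt p = p.2.2.any (fun c => !(decide (c ∈ p.2.1))) := by
  rcases p with ⟨u, topics, clicks⟩
  unfold has_novel_click_alt
  by_cases hany : (clicks.any (fun c => !(decide (c ∈ topics)))) = true
  · rw [hany]
    simp only [List.any_eq_true, Bool.not_eq_true', decide_eq_false_iff_not] at hany
    obtain ⟨x, hx, hnx⟩ := hany
    have hmem : x ∈ PySem.Set.diff (PySem.Set.ofList clicks) topics :=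
      (PySem.Set.mem_diff _ _ _).mpr ⟨(PySem.Set.mem_ofList _ _).mpr hx, hnx⟩
    have hne : PySem.Set.diff (PySem.Set.ofList clicks) topics ≠ [] :=
      List.ne_nil_of_mem hmem
    simp [hne]
  · rw [Bool.not_eq_true] at hany
    rw [hany]
    simp only [List.any_eq_false] at hany
    have hnil : PySem.Set.diff (PySem.Set.ofList clicks) topics = [] := by
      rw [List.eq_nil_iff_forall_not_mem]
      intro x hx
      rw [PySem.Set.mem_diff] at hx
      have := hany x ((PySem.Set.mem_ofList _ _).mp hx.1)
      simp at this
      exact hx.2 this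
    rw [hnil]
    rfl

-- ===== VERDICT (by name: the statement is the Claim_ definition above) =====
theorem has_novel_click_spec : Claim_equal_has_novel_click := by
  intro p _
  unfold Spec_has_novel_click has_novel_click
  rw [loopA_eq_any p.2.1 p.2.2, alt_eq_any p]
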